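-- pv_equiv track=rewrite | github.com/Sina14KD/CPP-SearchRescue | nopp_algorithm.py | phaseFour_FinalCheck
-- ===== SOURCE A (Python) =====
-- def phaseFour_FinalCheck(path,dPath,feasibleSet,numOfRemained_P_Moves):
--
--     if len(feasibleSet)!=0:
--
--         for i in range(len(feasibleSet)):
--
--             lastCell=path[-1]
--             nextU_Candid=[lastCell[0],lastCell[1]+1]
--
--             if nextU_Candid in feasibleSet:
--                 dPath.append('U')
--                 path.append(nextU_Candid)
--
--     return path,dPath,feasibleSet
-- ===== SOURCE B (Python) =====
-- def phaseFour_FinalCheck(path, dPath, feasibleSet, numOfRemained_P_Moves):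
--     # measure-then-bulk-extend: hash set of cells, compute run length L, extend once
--     if feasibleSet:
--         feas = {tuple(c) for c in feasibleSet}
--         last = path[-1]
--         x, y = last[0], last[1]
--         L = 0
--         while (x, y + 1 + L) in feas:
--             L += 1
--         path.extend([x, y + 1 + i] for i in range(L))
--         dPath.extend('U' * L)
--     return path, dPath, feasibleSet
-- ===== Notes on version B (the rewrite author's own statement) =====
-- stated objective: alternative
-- what changed: A re-checks membership in the feasibleSet list once per iteration of a fixed len(feasibleSet)-step append loop; B builds a set of cells once, measures the length L of the maximal run of consecutive upward cells, and bulk-extends path and dPath once.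
import Mathlib
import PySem

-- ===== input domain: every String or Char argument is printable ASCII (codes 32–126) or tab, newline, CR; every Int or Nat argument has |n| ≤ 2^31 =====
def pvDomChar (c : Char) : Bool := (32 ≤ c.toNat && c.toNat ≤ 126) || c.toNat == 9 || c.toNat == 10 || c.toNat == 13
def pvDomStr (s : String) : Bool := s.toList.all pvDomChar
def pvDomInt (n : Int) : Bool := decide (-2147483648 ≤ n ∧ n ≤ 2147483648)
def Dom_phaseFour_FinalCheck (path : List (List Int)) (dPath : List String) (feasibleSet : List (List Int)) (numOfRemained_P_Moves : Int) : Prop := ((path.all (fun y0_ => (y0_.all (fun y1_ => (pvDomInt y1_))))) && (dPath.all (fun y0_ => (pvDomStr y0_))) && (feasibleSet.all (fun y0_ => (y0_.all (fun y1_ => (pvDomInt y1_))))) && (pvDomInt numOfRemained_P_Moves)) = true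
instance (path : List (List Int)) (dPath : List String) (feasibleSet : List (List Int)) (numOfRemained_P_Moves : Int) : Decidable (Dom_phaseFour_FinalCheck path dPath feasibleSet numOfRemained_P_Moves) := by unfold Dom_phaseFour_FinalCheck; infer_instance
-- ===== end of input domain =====

-- B replaces A's per-iteration list-membership loop by a hash set plus measure-then-bulk-extend.
-- Both Pythons mutate path and dPath in place identically; the equivalence proved is about the return value.

-- ===== PORT A =====
-- one iteration of A's for-loop body (the loop index i is unused by A)
def pvStepA (feas : List (List Int)) (st : List (List Int) × List String) :
    List (List Int) × List String :=
  match PySem.List.pyGet? st.1 (-1) with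
  | none => st            -- Python raises IndexError here (path empty); outside Pre_
  | some lastCell =>
    match PySem.List.pyGet? lastCell 0, PySem.List.pyGet? lastCell 1 with
    | some x, some y =>
      let nextU_Candid := [x, y + 1]
      if nextU_Candid ∈ feas then (st.1 ++ [nextU_Candid], st.2 ++ ["U"]) else st
    | _, _ => st          -- Python raises IndexError here (last cell too short); outside Pre_

-- 'for i in range(len(feasibleSet))' with i unused: iterate the body n times
def pvIterA (feas : List (List Int)) : Nat → List (List Int) × List String → List (List Int) × List String
  | 0, st => st
  | n + 1, st => pvIterA feas n (pvStepA feas st)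

def phaseFour_FinalCheck (path : List (List Int)) (dPath : List String) (feasibleSet : List (List Int)) (numOfRemained_P_Moves : Int) : List (List Int) × List String × List (List Int) :=
  if feasibleSet.length ≠ 0 then
    let st := pvIterA feasibleSet feasibleSet.length (path, dPath)
    (st.1, st.2, feasibleSet)
  else (path, dPath, feasibleSet)

-- ===== PORT B =====
-- B's 'while (x, y+1+L) in feas: L += 1'; fuel |feasibleSet| is a valid bound since the
-- run's cells are pairwise distinct members of feasibleSet, so the run length ≤ |feasibleSet|
def pvRunLen (feas : PySem.Set (List Int)) (x y : Int) : Nat → Nat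
  | 0 => 0
  | n + 1 => if PySem.Set.contains feas [x, y] then pvRunLen feas x (y + 1) n + 1 else 0

def phaseFour_FinalCheck_alt (path : List (List Int)) (dPath : List String) (feasibleSet : List (List Int)) (numOfRemained_P_Moves : Int) : List (List Int) × List String × List (List Int) :=
  if feasibleSet ≠ [] then
    match PySem.List.pyGet? path (-1) with
    | none => (path, dPath, feasibleSet)     -- Python raises IndexError; outside Pre_
    | some last =>
      match PySem.List.pyGet? last 0, PySem.List.pyGet? last 1 with
      | some x, some y =>
        let feas : PySem.Set (List Int) := PySem.Set.ofList feasibleSet  -- {tuple(c) for c in feasibleSet}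
        let L := pvRunLen feas x (y + 1) feasibleSet.length
        (path ++ (List.range L).map (fun (i : Nat) => [x, y + 1 + (i : Int)]),
         dPath ++ List.replicate L "U", feasibleSet)
      | _, _ => (path, dPath, feasibleSet)   -- Python raises IndexError; outside Pre_
  else (path, dPath, feasibleSet)

-- ===== PRECONDITION & SPEC =====
-- Pre_ excludes exactly the inputs where A raises IndexError: a nonempty feasibleSet with an
-- empty path or a last path cell of fewer than two coordinates (path[-1][0]/[1] fails).
def Pre_phaseFour_FinalCheck (path : List (List Int)) (dPath : List String) (feasibleSet : List (List Int)) (numOfRemained_P_Moves : Int) : Prop :=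
  feasibleSet ≠ [] → (path ≠ [] ∧ 2 ≤ (path.getLastD []).length)
instance (path : List (List Int)) (dPath : List String) (feasibleSet : List (List Int)) (numOfRemained_P_Moves : Int) : Decidable (Pre_phaseFour_FinalCheck path dPath feasibleSet numOfRemained_P_Moves) := by unfold Pre_phaseFour_FinalCheck; infer_instance

def pvWitness_phaseFour_FinalCheck : List (List Int) × List String × List (List Int) × Int :=
  ([[0, 0]], [], [[0, 1], [0, 2]], 0)

def Spec_phaseFour_FinalCheck (path : List (List Int)) (dPath : List String) (feasibleSet : List (List Int)) (numOfRemained_P_Moves : Int) (out : List (List Int) × List String × List (List Int)) : Prop := out = phaseFour_FinalCheck_alt path dPath feasibleSet numOfRemained_P_Moves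
instance (path : List (List Int)) (dPath : List String) (feasibleSet : List (List Int)) (numOfRemained_P_Moves : Int) (out : List (List Int) × List String × List (List Int)) : Decidable (Spec_phaseFour_FinalCheck path dPath feasibleSet numOfRemained_P_Moves out) := by unfold Spec_phaseFour_FinalCheck; infer_instance

-- ===== CLAIM (what is proved, stated in full; the proofs are below) =====
def Claim_equal_phaseFour_FinalCheck : Prop := ∀ (path : List (List Int)) (dPath : List String) (feasibleSet : List (List Int)) (numOfRemained_P_Moves : Int), Dom_phaseFour_FinalCheck path dPath feasibleSet numOfRemained_P_Moves → Pre_phaseFour_FinalCheck path dPath feasibleSet numOfRemained_P_Moves → Spec_phaseFour_FinalCheck path dPath feasibleSet numOfRemained_P_Moves (phaseFour_FinalCheck path dPath feasibleSet numOfRemained_P_Moves)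

-- ===== LEMMAS AND PROOFS =====

lemma pvRunLen_zero_of_not_mem {feas : List (List Int)} {x y : Int} (n : Nat)
    (h : [x, y] ∉ feas) : pvRunLen (PySem.Set.ofList feas) x y n = 0 := by
  cases n with
  | zero => rfl
  | succ n => simp [pvRunLen, h]

lemma cells_shift (x : Int) : ∀ (m : Nat) (b : Int),
    (List.range (m + 1)).map (fun (i : Nat) => [x, b + (i : Int)]) =
      [x, b] :: (List.range m).map (fun (i : Nat) => [x, b + 1 + (i : Int)]) := by
  intro m
  induction m with
  | zero => intro b; simp
  | succ m ih =>
    intro b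
    rw [List.range_succ, List.map_append, ih b, List.range_succ, List.map_append]
    simp only [List.map_cons, List.map_nil, List.cons_append]
    push_cast
    ring_nf

lemma pvIterA_run (feas : List (List Int)) :
    ∀ (n : Nat) (p : List (List Int)) (d : List String) (lc : List Int) (x y : Int),
    PySem.List.pyGet? p (-1) = some lc →
    PySem.List.pyGet? lc 0 = some x →
    PySem.List.pyGet? lc 1 = some y →
    pvIterA feas n (p, d) =
      (p ++ (List.range (pvRunLen (PySem.Set.ofList feas) x (y + 1) n)).map
          (fun (i : Nat) => [x, y + 1 + (i : Int)]),
       d ++ List.replicate (pvRunLen (PySem.Set.ofList feas) x (y + 1) n) "U") := by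
  intro n
  induction n with
  | zero => intro p d lc x y _ _ _; simp [pvIterA, pvRunLen]
  | succ n ih =>
    intro p d lc x y hlast h0 h1
    by_cases hm : [x, y + 1] ∈ feas
    · have hc : PySem.Set.contains (PySem.Set.ofList feas) [x, y + 1] = true := by
        simpa using hm
      have hstep : pvStepA feas (p, d) = (p ++ [[x, y + 1]], d ++ ["U"]) := by
        simp [pvStepA, hlast, h0, h1, hm]
      have hih := ih (p ++ [[x, y + 1]]) (d ++ ["U"]) [x, y + 1] x (y + 1)
        (PySem.List.pyGet?_neg_one_append_singleton p [x, y + 1]) (by rfl) (by rfl)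
      have hrl : pvRunLen (PySem.Set.ofList feas) x (y + 1) (n + 1)
          = pvRunLen (PySem.Set.ofList feas) x (y + 1 + 1) n + 1 := by
        simp [pvRunLen, hm]
      simp only [pvIterA, hstep, hih, hrl]
      rw [cells_shift x _ (y + 1)]
      simp [List.replicate_succ]
    · have hstep : pvStepA feas (p, d) = (p, d) := by
        simp [pvStepA, hlast, h0, h1, hm]
      have hih := ih p d lc x y hlast h0 h1
      simp only [pvIterA, hstep, hih,
        pvRunLen_zero_of_not_mem n hm, pvRunLen_zero_of_not_mem (n + 1) hm]

-- ===== VERDICT (by name: the statement is the Claim_ definition above) =====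
theorem phaseFour_FinalCheck_spec : Claim_equal_phaseFour_FinalCheck := by
  intro path dPath feasibleSet numOfRemained_P_Moves _ hpre
  unfold Spec_phaseFour_FinalCheck
  by_cases hfs : feasibleSet = []
  · subst hfs; simp [phaseFour_FinalCheck, phaseFour_FinalCheck_alt]
  · obtain ⟨hp, hlen⟩ := hpre hfs
    obtain ⟨lc, hlc⟩ : ∃ lc, path.getLast? = some lc := by
      cases h : path.getLast? with
      | none => exact absurd (List.getLast?_eq_none_iff.mp h) hp
      | some lc => exact ⟨lc, rfl⟩
    have hlcD : path.getLastD [] = lc := by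
      simp [List.getLastD_eq_getLast?, hlc]
    rw [hlcD] at hlen
    have hlast : PySem.List.pyGet? path (-1) = some lc := by
      rw [PySem.List.pyGet?_neg_one, hlc]
    have h0 : PySem.List.pyGet? lc 0 = some (lc[0]'(by omega)) :=
      PySem.List.pyGet?_ofNat lc 0 (by omega)
    have h1 : PySem.List.pyGet? lc 1 = some (lc[1]'(by omega)) :=
      PySem.List.pyGet?_ofNat lc 1 (by omega)
    have hrun := pvIterA_run feasibleSet feasibleSet.length path dPath lc _ _
      hlast h0 h1
    simp [phaseFour_FinalCheck, phaseFour_FinalCheck_alt, hfs, hlast, h0, h1, hrun,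
      List.length_eq_zero_iff]
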